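-- pv_equiv track=rewrite | github.com/SongY123/SpatialText2SQL | src/prompting/prompt_builder.py | _split_prompt_sections
-- ===== SOURCE A (Python) =====
-- from typing import Any, Dict, List, Optional, Tuple
--
-- def _split_prompt_sections(rendered: str) -> Tuple[List[str], List[Tuple[str, List[str]]]]:
--     preamble: List[str] = []
--     sections: List[Tuple[str, List[str]]] = []
--     current_header: Optional[str] = None
--     current_body: List[str] = []
--
--     for line in rendered.splitlines():
--         if line.startswith("## "):
--             if current_header is None:
--                 pass
--             else:
--                 sections.append((current_header, current_body))
--             current_header = line.rstrip()
--             current_body = []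
--             continue
--
--         if current_header is None:
--             preamble.append(line.rstrip())
--         else:
--             current_body.append(line.rstrip())
--
--     if current_header is not None:
--         sections.append((current_header, current_body))
--
--     return preamble, sections
-- ===== SOURCE B (Python) =====
-- from typing import List, Tuple
--
-- def _split_prompt_sections(rendered: str) -> Tuple[List[str], List[Tuple[str, List[str]]]]:
--     lines = rendered.splitlines()
--     i = 0
--     while i < len(lines) and not lines[i].startswith("## "):
--         i += 1
--     preamble = [l.rstrip() for l in lines[:i]]
--     sections: List[Tuple[str, List[str]]] = []
--     rest = lines[i:]
--     while rest:
--         j = 1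
--         while j < len(rest) and not rest[j].startswith("## "):
--             j += 1
--         sections.append((rest[0].rstrip(), [l.rstrip() for l in rest[1:j]]))
--         rest = rest[j:]
--     return preamble, sections
-- ===== Notes on version B (the rewrite author's own statement) =====
-- stated objective: alternative
-- what changed: Replaces A's single stateful pass (optional current header + accumulated body, flushed on the next header and at the end) with a span/slice decomposition: take the preamble up to the first header, then repeatedly slice each header's body up to the next header.
import Mathlib
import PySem

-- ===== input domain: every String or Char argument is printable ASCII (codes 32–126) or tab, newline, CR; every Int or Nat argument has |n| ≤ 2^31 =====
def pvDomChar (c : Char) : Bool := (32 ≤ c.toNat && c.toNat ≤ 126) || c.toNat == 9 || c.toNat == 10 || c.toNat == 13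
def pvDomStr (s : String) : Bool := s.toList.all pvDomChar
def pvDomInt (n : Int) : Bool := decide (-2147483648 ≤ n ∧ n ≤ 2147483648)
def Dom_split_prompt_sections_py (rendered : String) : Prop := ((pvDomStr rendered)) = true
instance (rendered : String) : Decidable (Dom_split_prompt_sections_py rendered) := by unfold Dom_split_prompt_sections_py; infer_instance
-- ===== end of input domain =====

-- B differs from A only in decomposition (span/slice passes instead of one stateful fold); same value everywhere.

-- ===== PORT A =====
-- state: (preamble, sections, current_header, current_body)
def pvStateA := List String × List (String × List String) × Option String × List String

def pvStepA (st : pvStateA) (line : String) : pvStateA :=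
  let (pre, secs, hdr, body) := st
  if PySem.Str.startswith line "## " then
    match hdr with
    | none => (pre, secs, some (PySem.Str.rstrip line), [])
    | some h => (pre, secs ++ [(h, body)], some (PySem.Str.rstrip line), [])
  else
    match hdr with
    | none => (pre ++ [PySem.Str.rstrip line], secs, hdr, body)
    | some _ => (pre, secs, hdr, body ++ [PySem.Str.rstrip line])

def pvFinishA (st : pvStateA) : List String × List (String × List String) :=
  let (pre, secs, hdr, body) := st
  match hdr with
  | none => (pre, secs)
  | some h => (pre, secs ++ [(h, body)])

def split_prompt_sections_py (rendered : String) : List String × (List (String × List String)) :=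
  pvFinishA ((PySem.Str.splitlines rendered).foldl pvStepA ([], [], none, []))

-- ===== PORT B =====
def pvIsHdr (l : String) : Bool := PySem.Str.startswith l "## "

-- the inner while of B: one section per header line, body = lines up to the next header
def pvAltSections : List String → List (String × List String)
  | [] => []
  | h :: rest =>
      (PySem.Str.rstrip h, (rest.takeWhile (fun l => !pvIsHdr l)).map PySem.Str.rstrip)
        :: pvAltSections (rest.dropWhile (fun l => !pvIsHdr l))
termination_by l => l.length
decreasing_by
  simp only [List.length_cons]
  exact Nat.lt_succ_of_le (List.length_dropWhile_le _ _)

def split_prompt_sections_py_alt (rendered : String) : List String × (List (String × List String)) :=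
  let lines := PySem.Str.splitlines rendered
  ((lines.takeWhile (fun l => !pvIsHdr l)).map PySem.Str.rstrip,
   pvAltSections (lines.dropWhile (fun l => !pvIsHdr l)))

-- ===== PRECONDITION & SPEC =====
def Spec_split_prompt_sections_py (rendered : String) (out : List String × (List (String × List String))) : Prop := out = split_prompt_sections_py_alt rendered
instance (rendered : String) (out : List String × (List (String × List String))) : Decidable (Spec_split_prompt_sections_py rendered out) := by unfold Spec_split_prompt_sections_py; infer_instance

-- ===== CLAIM (what is proved, stated in full; the proofs are below) =====
def Claim_equal_split_prompt_sections_py : Prop := ∀ (rendered : String), Dom_split_prompt_sections_py rendered → Spec_split_prompt_sections_py rendered (split_prompt_sections_py rendered)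

-- ===== LEMMAS AND PROOFS =====

-- In the header state, finishing the fold yields the current section (with the rest of its body)
-- followed by the span-decomposed sections.
theorem pvFoldSome (lines : List String) : ∀ (pre : List String)
    (secs : List (String × List String)) (h : String) (body : List String),
    pvFinishA (lines.foldl pvStepA (pre, secs, some h, body)) =
      (pre, secs ++ (h, body ++ (lines.takeWhile (fun l => !pvIsHdr l)).map PySem.Str.rstrip)
        :: pvAltSections (lines.dropWhile (fun l => !pvIsHdr l))) := by
  induction lines with
  | nil => intro pre secs h body; simp [pvFinishA, pvAltSections]
  | cons l t ih =>
    intro pre secs h body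
    by_cases hl : pvIsHdr l = true
    · simp only [List.foldl_cons, pvStepA, pvIsHdr] at hl ⊢
      rw [hl]
      simp only [if_true, ih, List.takeWhile_cons, List.dropWhile_cons, pvIsHdr, hl,
        Bool.not_true, Bool.false_eq_true, if_false, pvAltSections]
      simp
    · simp only [List.foldl_cons, pvStepA, pvIsHdr] at hl ⊢
      rw [Bool.not_eq_true] at hl
      rw [hl]
      simp only [Bool.false_eq_true, if_false, ih, List.takeWhile_cons, List.dropWhile_cons,
        pvIsHdr, hl, Bool.not_false, if_true, List.map_cons]
      simp

-- In the preamble state, finishing the fold appends the span preamble and produces all sections.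
theorem pvFoldNone (lines : List String) : ∀ (pre : List String),
    pvFinishA (lines.foldl pvStepA (pre, [], none, [])) =
      (pre ++ (lines.takeWhile (fun l => !pvIsHdr l)).map PySem.Str.rstrip,
       pvAltSections (lines.dropWhile (fun l => !pvIsHdr l))) := by
  induction lines with
  | nil => intro pre; simp [pvFinishA, pvAltSections]
  | cons l t ih =>
    intro pre
    by_cases hl : pvIsHdr l = true
    · simp only [List.foldl_cons, pvStepA, pvIsHdr] at hl ⊢
      rw [hl]
      simp only [if_true, pvFoldSome, List.takeWhile_cons, List.dropWhile_cons, pvIsHdr, hl,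
        Bool.not_true, Bool.false_eq_true, if_false, pvAltSections]
      simp
    · simp only [List.foldl_cons, pvStepA, pvIsHdr] at hl ⊢
      rw [Bool.not_eq_true] at hl
      rw [hl]
      simp only [Bool.false_eq_true, if_false, ih, List.takeWhile_cons, List.dropWhile_cons,
        pvIsHdr, hl, Bool.not_false, if_true, List.map_cons]
      simp

-- ===== VERDICT (by name: the statement is the Claim_ definition above) =====
theorem split_prompt_sections_py_spec : Claim_equal_split_prompt_sections_py := by
  intro rendered _
  unfold Spec_split_prompt_sections_py split_prompt_sections_py split_prompt_sections_py_alt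
  rw [pvFoldNone]
  simp
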